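-- pv_equiv track=rewrite | github.com/veritas-sot/veritas | veritas/checkmk/checkmk.py | get_folder_config
-- ===== SOURCE A (Python) =====
-- def get_folder_config(folders_config, folder_name):
--     default = None
--     for folder in folders_config:
--         if folder['name'] == folder_name:
--             response = dict(folder)
--             del response['name']
--             return response
--         elif folder['name'] == 'default':
--             response = dict(folder)
--             del response['name']
--             default = response
--     return default
-- ===== SOURCE B (Python) =====
-- def get_folder_config(folders_config, folder_name):
--     match = next((f for f in folders_config if f['name'] == folder_name), None)
--     if match is not None:
--         response = dict(match)
--         del response['name']
--         return response
--     for folder in reversed(folders_config):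
--         if folder['name'] == 'default':
--             response = dict(folder)
--             del response['name']
--             return response
--     return None
-- ===== Notes on version B (the rewrite author's own statement) =====
-- stated objective: alternative
-- what changed: A's single loop threading a 'last default seen' accumulator is replaced by two independent lookups: a first-match search for folder_name, and on failure a reversed scan that returns the first 'default' from the back (= A's last default).
import Mathlib
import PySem

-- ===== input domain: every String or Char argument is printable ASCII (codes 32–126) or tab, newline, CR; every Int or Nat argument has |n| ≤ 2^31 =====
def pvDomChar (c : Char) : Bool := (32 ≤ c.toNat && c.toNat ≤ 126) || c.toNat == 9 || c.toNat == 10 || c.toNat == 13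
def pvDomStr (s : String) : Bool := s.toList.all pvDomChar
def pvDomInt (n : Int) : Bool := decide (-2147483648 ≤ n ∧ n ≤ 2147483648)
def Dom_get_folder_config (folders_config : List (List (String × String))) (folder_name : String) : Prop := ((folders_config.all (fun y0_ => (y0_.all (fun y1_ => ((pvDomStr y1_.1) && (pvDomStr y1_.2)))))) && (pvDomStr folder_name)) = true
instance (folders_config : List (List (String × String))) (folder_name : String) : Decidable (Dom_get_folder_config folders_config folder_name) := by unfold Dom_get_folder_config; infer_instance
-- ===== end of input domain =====

-- B replaces A's single loop with a 'last default' accumulator by two independent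
-- lookups (first match for folder_name, else first 'default' scanning from the back);
-- objective: alternative decomposition, same cost.

-- ===== PORT A =====
-- folder['name']  (dict lookup; none = key absent, where Python raises KeyError)
def pvName (f : List (String × String)) : Option String := (PySem.Dict.ofList f).get? "name"

-- response = dict(folder); del response['name']
def pvStrip (f : List (String × String)) : List (String × String) :=
  ((PySem.Dict.ofList f).erase "name").items

def pvLoopA (folder_name : String) :
    List (List (String × String)) → Option (List (String × String)) → Option (List (String × String))
  | [], dflt => dflt
  | folder :: rest, dflt =>
    if pvName folder = some folder_name then some (pvStrip folder)
    else if pvName folder = some "default" then pvLoopA folder_name rest (some (pvStrip folder))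
    else pvLoopA folder_name rest dflt

def get_folder_config (folders_config : List (List (String × String))) (folder_name : String) : Option (List (String × String)) :=
  pvLoopA folder_name folders_config none

-- ===== PORT B =====
def get_folder_config_alt (folders_config : List (List (String × String))) (folder_name : String) : Option (List (String × String)) :=
  match folders_config.find? (fun f => pvName f == some folder_name) with
  | some f => some (pvStrip f)
  | none =>
    (folders_config.reverse.find? (fun f => pvName f == some "default")).map pvStrip

-- ===== PRECONDITION & SPEC =====
-- Pre_ is exactly where Python A returns: every folder missing a 'name' key is preceded
-- by a folder whose 'name' equals folder_name (otherwise A raises KeyError at it).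
def Pre_get_folder_config (folders_config : List (List (String × String))) (folder_name : String) : Prop :=
  ∀ i : Fin folders_config.length, pvName folders_config[i] = none →
    ∃ j : Fin folders_config.length, j < i ∧ pvName folders_config[j] = some folder_name
instance (folders_config : List (List (String × String))) (folder_name : String) : Decidable (Pre_get_folder_config folders_config folder_name) := by unfold Pre_get_folder_config; infer_instance

def pvWitness_get_folder_config : (List (List (String × String))) × String :=
  ([[("name", "x"), ("a", "b")], [("name", "default"), ("c", "d")]], "x")

def Spec_get_folder_config (folders_config : List (List (String × String))) (folder_name : String) (out : Option (List (String × String))) : Prop := out = get_folder_config_alt folders_config folder_name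
instance (folders_config : List (List (String × String))) (folder_name : String) (out : Option (List (String × String))) : Decidable (Spec_get_folder_config folders_config folder_name out) := by unfold Spec_get_folder_config; infer_instance

-- ===== CLAIM (what is proved, stated in full; the proofs are below) =====
def Claim_equal_get_folder_config : Prop := ∀ (folders_config : List (List (String × String))) (folder_name : String), Dom_get_folder_config folders_config folder_name → Pre_get_folder_config folders_config folder_name → Spec_get_folder_config folders_config folder_name (get_folder_config folders_config folder_name)

-- ===== LEMMAS AND PROOFS =====
-- A's loop with accumulator d computes: first match, else last default, else d.
theorem pvLoopA_eq (n : String) (l : List (List (String × String))) (d : Option (List (String × String))) :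
    pvLoopA n l d =
      match l.find? (fun f => pvName f == some n) with
      | some f => some (pvStrip f)
      | none =>
        match l.reverse.find? (fun f => pvName f == some "default") with
        | some f => some (pvStrip f)
        | none => d := by
  induction l generalizing d with
  | nil => rfl
  | cons f t ih =>
    by_cases hm : pvName f = some n
    · simp [pvLoopA, hm]
    · have hm' : (pvName f == some n) = false := by simp [hm]
      by_cases hd : pvName f = some "default"
      · have hne : ("default" == n) = false := by
          rcases eq_or_ne "default" n with h | h
          · exact absurd (by rw [hd, h]) hm
          · simp [h]
        simp only [pvLoopA, hd, ih, List.find?_cons,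
          List.reverse_cons, List.find?_append]
        cases ht : t.find? (fun f => pvName f == some n) <;>
          cases hr : t.reverse.find? (fun f => pvName f == some "default") <;>
            simp [hne]
            <;> (intro h; rw [h] at hne; simp at hne)
      · have hd' : (pvName f == some "default") = false := by simp [hd]
        simp only [pvLoopA, if_neg hm, if_neg hd, ih, List.find?_cons, hm', hd',
          List.reverse_cons, List.find?_append]
        cases ht : t.find? (fun f => pvName f == some n) <;>
          cases hr : t.reverse.find? (fun f => pvName f == some "default") <;>
            simp

-- ===== VERDICT (by name: the statement is the Claim_ definition above) =====
theorem get_folder_config_spec : Claim_equal_get_folder_config := by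
  intro fc n _ _
  unfold Spec_get_folder_config get_folder_config get_folder_config_alt
  rw [pvLoopA_eq]
  cases fc.find? (fun f => pvName f == some n) <;>
    cases fc.reverse.find? (fun f => pvName f == some "default") <;> rfl
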